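-- pv_equiv track=rewrite | github.com/zacharybeebe/treetopper | treetopper/_constants.py | add_logs_to_table_heads
-- ===== SOURCE A (Python) =====
-- def add_logs_to_table_heads(max_logs):
--     master = []
--     for i in range(2, max_logs + 1):
--         for name in ['Length', 'Grade', 'Defect']:
--             master.append(f'Log {i} {name}')
--         if i < max_logs:
--             master.append('Between Logs Feet')
--     return master
-- ===== SOURCE B (Python) =====
-- def add_logs_to_table_heads(max_logs):
--     blocks = [[f'Log {i} {name}' for name in ('Length', 'Grade', 'Defect')]
--               for i in range(2, max_logs + 1)]
--     if not blocks:
--         return []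
--     master = list(blocks[0])
--     for block in blocks[1:]:
--         master.append('Between Logs Feet')
--         master.extend(block)
--     return master
-- ===== Notes on version B (the rewrite author's own statement) =====
-- stated objective: alternative
-- what changed: B precomputes the three-name block for each log and joins the blocks with the 'Between Logs Feet' separator, removing A's inline `if i < max_logs` branch inside the loop.
import Mathlib
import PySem

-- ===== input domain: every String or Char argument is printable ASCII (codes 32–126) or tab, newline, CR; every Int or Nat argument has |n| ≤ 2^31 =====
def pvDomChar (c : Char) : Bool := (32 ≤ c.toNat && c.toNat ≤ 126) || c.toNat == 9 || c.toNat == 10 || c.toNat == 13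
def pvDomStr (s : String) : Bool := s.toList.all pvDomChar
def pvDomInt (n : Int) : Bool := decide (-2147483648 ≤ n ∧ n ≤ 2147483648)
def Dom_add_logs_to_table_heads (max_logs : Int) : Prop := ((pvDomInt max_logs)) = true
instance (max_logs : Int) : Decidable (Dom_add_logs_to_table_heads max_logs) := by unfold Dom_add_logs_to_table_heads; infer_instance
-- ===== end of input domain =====

-- B replaces A's inline `if i < max_logs` separator branch by precomputing per-log
-- blocks and joining them with the separator (objective: alternative decomposition).

-- ===== PORT A =====
-- literal transliteration of A: one fold over range(2, max_logs+1), inner fold over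
-- the three names, then a conditional separator append.
def add_logs_to_table_heads (max_logs : Int) : List String :=
  (PySem.List.pyRange 2 (max_logs + 1) 1).foldl
    (fun master i =>
      let master := ["Length", "Grade", "Defect"].foldl
        (fun m name => m ++ ["Log " ++ PySem.Int.toStr i ++ " " ++ name]) master
      if i < max_logs then master ++ ["Between Logs Feet"] else master)
    []

-- ===== PORT B =====
-- the per-log block of three header names (B's inner comprehension)
def pvBlock (i : Int) : List String :=
  ["Length", "Grade", "Defect"].map (fun name => "Log " ++ PySem.Int.toStr i ++ " " ++ name)

-- literal transliteration of B: build the list of blocks, then join with the separator.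
def add_logs_to_table_heads_alt (max_logs : Int) : List String :=
  match (PySem.List.pyRange 2 (max_logs + 1) 1).map pvBlock with
  | [] => []
  | b :: bs => bs.foldl (fun master block => master ++ ["Between Logs Feet"] ++ block) b

-- ===== PRECONDITION & SPEC =====
def Spec_add_logs_to_table_heads (max_logs : Int) (out : List String) : Prop := out = add_logs_to_table_heads_alt max_logs
instance (max_logs : Int) (out : List String) : Decidable (Spec_add_logs_to_table_heads max_logs out) := by unfold Spec_add_logs_to_table_heads; infer_instance

-- ===== CLAIM (what is proved, stated in full; the proofs are below) =====
def Claim_equal_add_logs_to_table_heads : Prop := ∀ (max_logs : Int), Dom_add_logs_to_table_heads max_logs → Spec_add_logs_to_table_heads max_logs (add_logs_to_table_heads max_logs)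

-- ===== LEMMAS AND PROOFS =====

-- A's loop body, with the inner name-fold collapsed to an append of the block
theorem pvA_fun (n : Int) :
    (fun (master : List String) (i : Int) =>
      let m := ["Length", "Grade", "Defect"].foldl
        (fun m name => m ++ ["Log " ++ PySem.Int.toStr i ++ " " ++ name]) master
      if i < n then m ++ ["Between Logs Feet"] else m)
    = (fun master i =>
        if i < n then master ++ pvBlock i ++ ["Between Logs Feet"] else master ++ pvBlock i) := by
  funext master i
  simp [pvBlock, List.foldl]

-- core invariant: A's (collapsed) fold over [a..n] from acc equals B's separator-join
-- fold over the remaining blocks, started from acc ++ block a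
theorem pvKey (n : Int) : ∀ (k : Nat) (a : Int) (acc : List String), a + (k : Int) = n →
    (PySem.List.pyRange a (n + 1) 1).foldl
      (fun master i =>
        if i < n then master ++ pvBlock i ++ ["Between Logs Feet"] else master ++ pvBlock i)
      acc
    = ((PySem.List.pyRange (a + 1) (n + 1) 1).map pvBlock).foldl
        (fun master block => master ++ ["Between Logs Feet"] ++ block) (acc ++ pvBlock a) := by
  intro k
  induction k with
  | zero =>
    intro a acc h
    have ha : a = n := by omega
    subst ha
    rw [PySem.List.pyRange_one_singleton, PySem.List.pyRange_one_eq_nil (by omega)]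
    simp
  | succ k ih =>
    intro a acc h
    have h1 : a < n := by omega
    rw [PySem.List.pyRange_one_cons (by omega : a < n + 1), List.foldl_cons, if_pos h1,
        ih (a + 1) (acc ++ pvBlock a ++ ["Between Logs Feet"]) (by omega)]
    conv_rhs => rw [PySem.List.pyRange_one_cons (by omega : a + 1 < n + 1)]
    rw [List.map_cons, List.foldl_cons]

-- ===== VERDICT (by name: the statement is the Claim_ definition above) =====
theorem add_logs_to_table_heads_spec : Claim_equal_add_logs_to_table_heads := by
  intro n _
  unfold Spec_add_logs_to_table_heads add_logs_to_table_heads add_logs_to_table_heads_alt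
  rw [pvA_fun]
  by_cases h : n ≤ 1
  · rw [PySem.List.pyRange_one_eq_nil (by omega)]
    simp
  · rw [pvKey n (n - 2).toNat 2 [] (by omega),
        PySem.List.pyRange_one_cons (by omega : (2 : Int) < n + 1), List.map_cons]
    simp
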